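-- pv_equiv track=rewrite | github.com/eternidad33/leetcode | code/2021春赛题集/LCP30魔塔游戏.py | magicTower
-- ===== SOURCE A (Python) =====
-- import heapq
--
-- def magicTower(nums):
--     """
--     先遍历计算最后和是否为负数，负数直接返回
--     堆排序：将怪物房间存放进小根堆，数越小扣血越多
--     :param nums: 房间存放的是怪物（负数），补血（正数）
--     :return: 需移动次数
--     """
--     if sum(nums) < 0:
--         return -1
--     count = 0  # 移动次数
--     hurts = list()  # 扣血的房间
--     blood = 0  # 存储当前血量
--     heapq.heapify(hurts)
--     for num in nums:
--         blood += num
--         if num < 0: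
--             """房间值为负数，放入堆中"""
--             heapq.heappush(hurts, num)
--         if blood < 0:
--             """当前血量小于0，将堆中扣血最多的数也就是最小负数移动到后边，同时count+1"""
--             count += 1
--             blood -= heapq.heappop(hurts)
--
--     return count
-- ===== SOURCE B (Python) =====
-- def magicTower(nums):
--     if sum(nums) < 0:
--         return -1
--     blood = 0
--     hurts = []  # negative rooms still counted in blood, insertion order
--     for num in nums:
--         blood += num
--         if num < 0:
--             hurts.append(num)
--         if blood < 0:
--             m = min(hurts)      # linear scan instead of a heap
--             hurts.remove(m)
--             blood -= m
--     # every deferred room is a negative that left hurts: count = negatives seen - negatives kept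
--     return len([x for x in nums if x < 0]) - len(hurts)
-- ===== Notes on version B (the rewrite author's own statement) =====
-- stated objective: simpler
-- what changed: Replaces the heapq binary heap and the running count by a plain insertion-order list of negatives: when blood drops below zero the most negative value is found by a linear min scan and removed by value, and the move count is recovered at the end as (number of negative rooms) - (negatives still in the list).
import Mathlib
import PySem

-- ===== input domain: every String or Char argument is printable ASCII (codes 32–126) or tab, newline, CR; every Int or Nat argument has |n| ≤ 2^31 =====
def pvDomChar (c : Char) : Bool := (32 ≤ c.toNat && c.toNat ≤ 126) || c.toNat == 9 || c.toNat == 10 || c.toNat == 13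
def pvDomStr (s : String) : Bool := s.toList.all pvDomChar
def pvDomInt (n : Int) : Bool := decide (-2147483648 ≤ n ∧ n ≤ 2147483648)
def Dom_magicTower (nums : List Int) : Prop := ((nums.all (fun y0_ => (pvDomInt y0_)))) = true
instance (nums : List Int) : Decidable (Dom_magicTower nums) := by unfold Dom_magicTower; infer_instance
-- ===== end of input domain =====

-- B drops A's heapq heap and running count: it keeps a plain insertion-order list of
-- negatives, removes the min (found by a linear scan) when blood dips below zero, and
-- recovers the count at the end as (#negatives) − (negatives kept). Objective: simpler.

-- ===== PORT A =====
-- heapq is modelled by a list kept in ascending order: heappush = ordered insert,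
-- heappop = take the head (the minimum) — exact for the values Python's heap yields.
def heapPush (v : Int) : List Int → List Int
  | [] => [v]
  | x :: xs => if v ≤ x then v :: x :: xs else x :: heapPush v xs

def magicTowerStepA (s : Int × List Int × Int) (num : Int) : Int × List Int × Int :=
  let count := s.1
  let hurts := s.2.1
  let blood := s.2.2 + num
  let hurts := if num < 0 then heapPush num hurts else hurts
  if blood < 0 then
    match hurts with
    | [] => (count, [], blood)          -- heappop on an empty heap: unreachable (Python would raise)
    | m :: rest => (count + 1, rest, blood - m)
  else (count, hurts, blood)

def magicTower (nums : List Int) : Int :=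
  if nums.sum < 0 then -1
  else (nums.foldl magicTowerStepA (0, [], 0)).1

-- ===== PORT B =====
/-- One loop body of B: add the room to blood, record a negative, and on blood < 0
remove the minimum recorded negative (linear `min` scan, removal by value). -/
def stepB (blood : Int) (hurts : List Int) (num : Int) : Int × List Int :=
  let blood := blood + num
  let hurts := if num < 0 then hurts ++ [num] else hurts
  if blood < 0 then
    match PySem.List.min? hurts (fun x => x) with
    | none => (blood, hurts)            -- min([]): unreachable (Python would raise)
    | some m => (blood - m, (PySem.List.remove? hurts m).getD hurts)
  else (blood, hurts)

/-- B's loop, as structural recursion over the rooms, carrying only (blood, hurts). -/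
def goB : List Int → Int → List Int → Int × List Int
  | [], blood, hurts => (blood, hurts)
  | num :: rest, blood, hurts =>
    let s := stepB blood hurts num
    goB rest s.1 s.2

def magicTower_alt (nums : List Int) : Int :=
  if nums.sum < 0 then -1
  else
    ((nums.countP (fun x => decide (x < 0)) : Int)) - (((goB nums 0 []).2.length : Int))

-- ===== PRECONDITION & SPEC =====
def Spec_magicTower (nums : List Int) (out : Int) : Prop := out = magicTower_alt nums
instance (nums : List Int) (out : Int) : Decidable (Spec_magicTower nums out) := by unfold Spec_magicTower; infer_instance

-- ===== CLAIM (what is proved, stated in full; the proofs are below) =====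
def Claim_equal_magicTower : Prop := ∀ (nums : List Int), Dom_magicTower nums → Spec_magicTower nums (magicTower nums)

-- ===== LEMMAS AND PROOFS =====

theorem heapPush_perm (v : Int) (l : List Int) : (heapPush v l).Perm (v :: l) := by
  induction l with
  | nil => simp [heapPush]
  | cons x xs ih =>
    simp only [heapPush]
    split
    · exact List.Perm.refl _
    · exact (ih.cons x).trans (List.Perm.swap v x xs)

theorem heapPush_sorted (v : Int) (l : List Int) (h : l.Pairwise (· ≤ ·)) :
    (heapPush v l).Pairwise (· ≤ ·) := by
  induction l with
  | nil => simp [heapPush]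
  | cons x xs ih =>
    simp only [heapPush]
    rcases List.pairwise_cons.mp h with ⟨hx, hxs⟩
    split
    · rename_i hvx
      refine List.pairwise_cons.mpr ⟨?_, h⟩
      intro y hy
      rcases List.mem_cons.mp hy with rfl | hy
      · exact hvx
      · exact le_trans hvx (hx y hy)
    · rename_i hvx
      refine List.pairwise_cons.mpr ⟨?_, ih hxs⟩
      intro y hy
      rcases List.mem_cons.mp ((heapPush_perm v xs).mem_iff.mp hy) with rfl | hy
      · omega
      · exact hx y hy

/-- A running-min fold over a list that contains `m`, started at a seed ≥ m,
with `m` a lower bound of everything, returns `m`. -/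
theorem foldl_min_eq (m : Int) : ∀ (l : List Int) (s : Int), m ∈ s :: l →
    (∀ y ∈ s :: l, m ≤ y) → l.foldl min s = m := by
  intro l
  induction l with
  | nil =>
    intro s hm _
    exact (List.mem_singleton.mp hm).symm
  | cons x xs ih =>
    intro s hm hb
    simp only [List.foldl_cons]
    apply ih
    · have key : m = s ∨ m = x ∨ m ∈ xs := by simpa using hm
      rcases key with rfl | rfl | h3
      · have h : min m x = m := min_eq_left (hb x (by simp))
        simp [h]
      · have h : min s m = m := min_eq_right (hb s (by simp))
        simp [h]
      · simp [h3]
    · intro y hy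
      rcases List.mem_cons.mp hy with rfl | h5
      · exact le_min (hb s (by simp)) (hb x (by simp))
      · exact hb y (by simp [h5])

/-- On any permutation of the sorted list `m :: rest`, Python's `min` returns `m`. -/
theorem min?_of_perm_sorted (m : Int) (rest hB : List Int)
    (hp : (m :: rest).Perm hB) (hs : (m :: rest).Pairwise (· ≤ ·)) :
    PySem.List.min? hB (fun x => x) = some m := by
  have hbound : ∀ y ∈ m :: rest, m ≤ y := by
    intro y hy
    rcases List.mem_cons.mp hy with rfl | hy
    · exact le_rfl
    · exact (List.pairwise_cons.mp hs).1 y hy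
  rcases hB with _ | ⟨b, tb⟩
  · exact absurd hp.symm (by simp)
  · rw [PySem.List.min?_id_cons]
    have hm : m ∈ b :: tb := hp.mem_iff.mp (by simp)
    have hb : ∀ y ∈ b :: tb, m ≤ y := fun y hy => hbound y (hp.mem_iff.mpr hy)
    exact congrArg some (foldl_min_eq m tb b hm hb)

/-- One loop step: starting from permutation-related sorted/insertion-order hurt lists
and the same blood, A's step and B's step keep the bloods equal, the hurt lists
permutation-related and A's sorted, and A's count grows by `[num<0] − Δ|hurts|`. -/
theorem stepOk (count : Int) (hA hB : List Int) (blood num : Int)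
    (hperm : hA.Perm hB) (hsort : hA.Pairwise (· ≤ ·)) :
    let sA := magicTowerStepA (count, hA, blood) num
    let sB := stepB blood hB num
    sA.2.2 = sB.1 ∧ sA.2.1.Perm sB.2 ∧ sA.2.1.Pairwise (· ≤ ·) ∧
      sA.1 + (sA.2.1.length : Int) =
        count + (hA.length : Int) + (if num < 0 then 1 else 0) := by
  simp only [magicTowerStepA, stepB]
  by_cases hneg : num < 0
  · simp only [if_pos hneg]
    have hperm' : (heapPush num hA).Perm (hB ++ [num]) :=
      (heapPush_perm num hA).trans ((hperm.cons num).trans (List.perm_append_singleton num hB).symm)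
    have hsort' := heapPush_sorted num hA hsort
    by_cases hb : blood + num < 0
    · rw [if_pos hb, if_pos hb]
      cases hhp : heapPush num hA with
      | nil =>
        exact absurd hhp (by
          intro h
          have := (heapPush_perm num hA).length_eq
          rw [h] at this
          simp at this)
      | cons m rest =>
        rw [hhp] at hperm' hsort'
        rw [min?_of_perm_sorted m rest _ hperm' hsort']
        have hm : m ∈ hB ++ [num] := hperm'.mem_iff.mp (by simp)
        dsimp only
        rw [PySem.List.remove?_eq_some_erase _ m hm]
        have hlen : (heapPush num hA).length = hA.length + 1 := by
          simpa using (heapPush_perm num hA).length_eq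
        rw [hhp] at hlen
        refine ⟨rfl, ?_, (List.pairwise_cons.mp hsort').2, ?_⟩
        · have h1 : ((m :: rest).erase m).Perm ((hB ++ [num]).erase m) := hperm'.erase m
          rw [List.erase_cons_head] at h1
          simpa using h1
        · simp only [List.length_cons] at hlen
          omega
    · rw [if_neg hb, if_neg hb]
      refine ⟨rfl, hperm', hsort', ?_⟩
      have hlen : (heapPush num hA).length = hA.length + 1 := by
        simpa using (heapPush_perm num hA).length_eq
      push_cast [hlen]
      ring
  · simp only [if_neg hneg]
    by_cases hb : blood + num < 0
    · rw [if_pos hb, if_pos hb]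
      cases hA with
      | nil =>
        have hBnil : hB = [] := hperm.symm.eq_nil
        subst hBnil
        simp [PySem.List.min?]
      | cons m rest =>
        rw [min?_of_perm_sorted m rest _ hperm hsort]
        have hm : m ∈ hB := hperm.mem_iff.mp (by simp)
        dsimp only
        rw [PySem.List.remove?_eq_some_erase _ m hm]
        refine ⟨rfl, ?_, (List.pairwise_cons.mp hsort).2, ?_⟩
        · have h1 : ((m :: rest).erase m).Perm (hB.erase m) := hperm.erase m
          rw [List.erase_cons_head] at h1
          simpa using h1
        · simp only [List.length_cons]
          push_cast
          ring
    · rw [if_neg hb, if_neg hb]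
      exact ⟨rfl, hperm, hsort, by ring⟩

/-- Main invariant: A's final count equals its start count plus the negatives of the
rest minus the net growth of B's hurt list. -/
theorem foldRel : ∀ (nums : List Int) (count : Int) (hA : List Int) (blood : Int) (hB : List Int),
    hA.Perm hB → hA.Pairwise (· ≤ ·) →
    (nums.foldl magicTowerStepA (count, hA, blood)).1 =
      count + (hA.length : Int) + (nums.countP (fun x => decide (x < 0)) : Int) -
        (((goB nums blood hB).2.length : Int)) := by
  intro nums
  induction nums with
  | nil =>
    intro count hA blood hB hperm _
    simp [goB, hperm.length_eq]
  | cons num rest ih =>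
    intro count hA blood hB hperm hsort
    obtain ⟨hblood, hperm', hsort', hcount⟩ := stepOk count hA hB blood num hperm hsort
    simp only [List.foldl_cons, goB, List.countP_cons]
    set sA := magicTowerStepA (count, hA, blood) num with hsA
    set sB := stepB blood hB num with hsB
    have hA3 : sA = (sA.1, sA.2.1, sA.2.2) := rfl
    rw [hA3, hblood] at *
    have := ih sA.1 sA.2.1 sB.1 sB.2 hperm' hsort'
    rw [this]
    by_cases hneg : num < 0
    · simp only [if_pos hneg] at hcount
      simp [hneg]
      omega
    · simp only [if_neg hneg] at hcount
      simp [hneg]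
      omega

-- ===== VERDICT (by name: the statement is the Claim_ definition above) =====
theorem magicTower_spec : Claim_equal_magicTower := by
  intro nums _
  unfold Spec_magicTower magicTower magicTower_alt
  by_cases hs : nums.sum < 0
  · rw [if_pos hs, if_pos hs]
  · rw [if_neg hs, if_neg hs]
    have := foldRel nums 0 [] 0 [] (List.Perm.refl _) List.Pairwise.nil
    simpa using this
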